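-- pv_equiv track=rewrite | github.com/EricTang2019/distill-sd | recipe/waste_sd/agent_loop/waste_sd_single_turn_agent_loop_v3.py | _trim_accept_lens
-- ===== SOURCE A (Python) =====
-- def _trim_accept_lens(accept_lens: list[int], response_len: int) -> list[int]:
--     """Trim speculative accept lengths so token coverage never exceeds response_len."""
--     if response_len <= 0:
--         return []
--
--     trimmed = []
--     remaining = response_len
--     for value in accept_lens:
--         if remaining <= 0:
--             break
--         step = int(value)
--         if step <= 0:
--             continue
--         step = min(step, remaining)
--         trimmed.append(step)
--         remaining -= step
--     return trimmed
-- ===== SOURCE B (Python) =====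
-- def _trim_accept_lens(accept_lens: list[int], response_len: int) -> list[int]:
--     """Filter positives, take full values while the prefix sum stays below
--     response_len, and clamp the crossing value."""
--     if response_len <= 0:
--         return []
--     vals = [s for v in accept_lens if (s := int(v)) > 0]
--     sums = []
--     total = 0
--     for s in vals:
--         total += s
--         sums.append(total)
--     out = []
--     for v, c in zip(vals, sums):
--         if c < response_len:
--             out.append(v)
--         else:
--             out.append(v - (c - response_len))
--             break
--     return out
-- ===== Notes on version B (the rewrite author's own statement) =====
-- stated objective: alternative
-- what changed: B replaces A's single stateful remaining-budget loop with a pipeline: filter the positive values, compute their prefix sums, emit full values while the cumulative sum is below response_len and clamp the first crossing value.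
import Mathlib
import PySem

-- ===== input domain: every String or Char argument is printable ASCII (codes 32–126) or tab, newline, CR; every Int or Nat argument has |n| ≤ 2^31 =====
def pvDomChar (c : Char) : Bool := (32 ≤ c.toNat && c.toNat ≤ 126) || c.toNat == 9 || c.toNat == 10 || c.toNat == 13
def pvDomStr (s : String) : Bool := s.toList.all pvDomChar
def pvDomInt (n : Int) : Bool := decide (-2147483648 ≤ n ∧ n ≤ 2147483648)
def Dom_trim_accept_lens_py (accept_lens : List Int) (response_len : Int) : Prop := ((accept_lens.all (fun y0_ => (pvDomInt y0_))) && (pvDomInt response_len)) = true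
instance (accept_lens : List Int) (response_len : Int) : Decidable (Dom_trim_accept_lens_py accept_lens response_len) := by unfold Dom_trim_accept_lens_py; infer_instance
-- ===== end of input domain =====

-- B replaces A's stateful remaining-budget loop by filter → prefix sums → clamp at the crossing point (alternative decomposition, same cost).


-- ===== PORT A =====
-- A's for-loop over accept_lens with state (remaining, trimmed); int(value) is the identity on Int
def trimGoA (xs : List Int) (remaining : Int) (trimmed : List Int) : List Int :=
  match xs with
  | [] => trimmed
  | v :: rest =>
    if remaining ≤ 0 then trimmed
    else if v ≤ 0 then trimGoA rest remaining trimmed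
    else trimGoA rest (remaining - min v remaining) (trimmed ++ [min v remaining])

def trim_accept_lens_py (accept_lens : List Int) (response_len : Int) : List Int :=
  if response_len ≤ 0 then []
  else trimGoA accept_lens response_len []

-- ===== PORT B =====
-- B's zip loop over (vals, prefix sums): full values below the threshold, clamped value at the crossing
def trimGoB (vals sums : List Int) (rl : Int) : List Int :=
  match vals, sums with
  | v :: vs, c :: cs => if c < rl then v :: trimGoB vs cs rl else [v - (c - rl)]
  | _, _ => []

def trim_accept_lens_py_alt (accept_lens : List Int) (response_len : Int) : List Int :=
  if response_len ≤ 0 then []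
  else
    let vals := accept_lens.filter (fun v => 0 < v)
    let sums := (vals.foldl (fun (st : Int × List Int) s => (st.1 + s, st.2 ++ [st.1 + s])) (0, [])).2
    trimGoB vals sums response_len

-- ===== PRECONDITION & SPEC =====
def Spec_trim_accept_lens_py (accept_lens : List Int) (response_len : Int) (out : List Int) : Prop := out = trim_accept_lens_py_alt accept_lens response_len
instance (accept_lens : List Int) (response_len : Int) (out : List Int) : Decidable (Spec_trim_accept_lens_py accept_lens response_len out) := by unfold Spec_trim_accept_lens_py; infer_instance

-- ===== CLAIM (what is proved, stated in full; the proofs are below) =====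
def Claim_equal_trim_accept_lens_py : Prop := ∀ (accept_lens : List Int) (response_len : Int), Dom_trim_accept_lens_py accept_lens response_len → Spec_trim_accept_lens_py accept_lens response_len (trim_accept_lens_py accept_lens response_len)

-- ===== LEMMAS AND PROOFS =====

-- canonical result function, proven equal to both ports
def trimF (xs : List Int) (rl : Int) : List Int :=
  match xs with
  | [] => []
  | v :: rest =>
    if v ≤ 0 then trimF rest rl
    else if v < rl then v :: trimF rest (rl - v)
    else [rl]

lemma trimGoA_nonpos (xs : List Int) (rl : Int) (acc : List Int) (h : rl ≤ 0) :
    trimGoA xs rl acc = acc := by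
  cases xs with
  | nil => rfl
  | cons v rest => simp [trimGoA, h]

lemma trimGoA_eq (xs : List Int) : ∀ (rl : Int) (acc : List Int), 0 < rl →
    trimGoA xs rl acc = acc ++ trimF xs rl := by
  induction xs with
  | nil => intro rl acc _; simp [trimGoA, trimF]
  | cons v rest ih =>
    intro rl acc hrl
    by_cases hv : v ≤ 0
    · simp [trimGoA, trimF, hv, not_le.mpr hrl, ih rl acc hrl]
    · by_cases hlt : v < rl
      · have hmin : min v rl = v := min_eq_left (le_of_lt hlt)
        simp only [trimGoA, trimF, if_neg (not_le.mpr hrl), if_neg hv, if_pos hlt, hmin]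
        rw [ih (rl - v) (acc ++ [v]) (by omega)]
        simp
      · have hmin : min v rl = rl := min_eq_right (by omega)
        simp only [trimGoA, trimF, if_neg (not_le.mpr hrl), if_neg hv, if_neg hlt, hmin]
        rw [show rl - rl = 0 by ring, trimGoA_nonpos rest 0 _ le_rfl]

-- prefix sums with starting offset t, matching B's fold
def psums (t : Int) (vals : List Int) : List Int :=
  match vals with
  | [] => []
  | v :: vs => (t + v) :: psums (t + v) vs

lemma fold_psums (vals : List Int) : ∀ (t : Int) (acc : List Int),
    (vals.foldl (fun (st : Int × List Int) s => (st.1 + s, st.2 ++ [st.1 + s])) (t, acc)).2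
      = acc ++ psums t vals := by
  induction vals with
  | nil => intro t acc; simp [psums]
  | cons v vs ih => intro t acc; simp [psums, List.foldl, ih]

-- B's zip loop on positive vals equals trimF restricted to positive lists, shifted by the offset
lemma trimGoB_eq (vals : List Int) : ∀ (t rl : Int),
    (∀ x ∈ vals, 0 < x) →
    trimGoB vals (psums t vals) rl = trimF vals (rl - t) := by
  induction vals with
  | nil => intro t rl _; simp [trimGoB, trimF]
  | cons v vs ih =>
    intro t rl hpos
    have hv : 0 < v := hpos v (List.mem_cons_self ..)
    have hrest : ∀ x ∈ vs, 0 < x := fun x hx => hpos x (List.mem_cons_of_mem _ hx)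
    by_cases hc : t + v < rl
    · have hlt : v < rl - t := by omega
      have e1 : rl - (t + v) = rl - t - v := by ring
      simp only [psums, trimGoB, trimF, if_pos hc, if_pos hlt, if_neg (not_le.mpr hv)]
      rw [ih (t + v) rl hrest, e1]
    · have h2 : ¬ v < rl - t := by omega
      have e2 : v - (t + v - rl) = rl - t := by ring
      simp only [psums, trimGoB, trimF, if_neg hc, if_neg h2, if_neg (not_le.mpr hv), e2]

-- trimF skips nonpositives, so it factors through filter
lemma trimF_filter (xs : List Int) : ∀ rl : Int,
    trimF (xs.filter (fun v => 0 < v)) rl = trimF xs rl := by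
  induction xs with
  | nil => intro rl; rfl
  | cons v rest ih =>
    intro rl
    by_cases hv : 0 < v
    · have : ¬ v ≤ 0 := not_le.mpr hv
      simp [hv, trimF, this, ih]
    · have : v ≤ 0 := not_lt.mp hv
      simp [hv, trimF, this, ih]

-- ===== VERDICT (by name: the statement is the Claim_ definition above) =====
theorem trim_accept_lens_py_spec : Claim_equal_trim_accept_lens_py := by
  intro xs rl _
  unfold Spec_trim_accept_lens_py trim_accept_lens_py trim_accept_lens_py_alt
  by_cases h : rl ≤ 0
  · simp [h]
  · have hrl : 0 < rl := not_le.mp h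
    simp only [if_neg h]
    rw [trimGoA_eq xs rl [] hrl, fold_psums]
    simp only [List.nil_append]
    rw [trimGoB_eq _ 0 rl (by
      intro x hx
      have := (List.mem_filter.mp hx).2
      simpa using this)]
    simp [trimF_filter]
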